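-- pv_equiv track=rewrite | github.com/saadfar07/DeepLearning-Log10-Predictor | main.py | count_ops_mlp
-- ===== SOURCE A (Python) =====
-- def count_ops_mlp(layers: int, hidden: int):
--     mult = 0
--     add = 0
--     in_dim = 1
--     for _ in range(layers):
--         out_dim = hidden
--         mult += in_dim * out_dim
--         add += in_dim * out_dim
--         in_dim = out_dim
--     # last layer to 1
--     out_dim = 1
--     mult += in_dim * out_dim
--     add += in_dim * out_dim
--     return mult, add
-- ===== SOURCE B (Python) =====
-- def count_ops_mlp(layers: int, hidden: int):
--     if layers <= 0:
--         return 1, 1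
--     m = 2 * hidden + (layers - 1) * hidden * hidden
--     return m, m
-- ===== Notes on version B (the rewrite author's own statement) =====
-- stated objective: faster
-- what changed: replaces the per-layer accumulation loop by a closed-form arithmetic formula 2*h + (layers-1)*h^2 with an explicit layers<=0 case
import Mathlib
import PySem

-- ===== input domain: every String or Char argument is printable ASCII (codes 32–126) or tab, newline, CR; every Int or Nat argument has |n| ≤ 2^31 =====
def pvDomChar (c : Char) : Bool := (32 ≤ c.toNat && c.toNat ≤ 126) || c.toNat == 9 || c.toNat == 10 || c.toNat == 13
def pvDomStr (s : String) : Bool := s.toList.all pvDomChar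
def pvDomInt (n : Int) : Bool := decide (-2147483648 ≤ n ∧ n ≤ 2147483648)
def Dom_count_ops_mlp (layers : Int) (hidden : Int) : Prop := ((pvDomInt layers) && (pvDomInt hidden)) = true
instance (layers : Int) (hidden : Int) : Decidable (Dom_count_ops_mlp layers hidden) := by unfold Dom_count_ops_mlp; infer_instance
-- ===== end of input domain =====

-- B replaces A's per-layer loop by a closed-form formula (O(1) instead of O(layers)).


-- ===== PORT A =====
-- state (mult, add, in_dim); loop body as in the Python
def count_ops_mlp (layers : Int) (hidden : Int) : List Int :=
  let s := (PySem.List.pyRange 0 layers 1).foldl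
    (fun (st : Int × Int × Int) _ =>
      let out_dim := hidden
      (st.1 + st.2.2 * out_dim, st.2.1 + st.2.2 * out_dim, out_dim))
    (0, 0, 1)
  let out_dim : Int := 1
  [s.1 + s.2.2 * out_dim, s.2.1 + s.2.2 * out_dim]

-- ===== PORT B =====
def count_ops_mlp_alt (layers : Int) (hidden : Int) : List Int :=
  if layers ≤ 0 then [1, 1]
  else
    let m := 2 * hidden + (layers - 1) * hidden * hidden
    [m, m]

-- ===== PRECONDITION & SPEC =====
def Spec_count_ops_mlp (layers : Int) (hidden : Int) (out : List Int) : Prop := out = count_ops_mlp_alt layers hidden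
instance (layers : Int) (hidden : Int) (out : List Int) : Decidable (Spec_count_ops_mlp layers hidden out) := by unfold Spec_count_ops_mlp; infer_instance

-- ===== CLAIM (what is proved, stated in full; the proofs are below) =====
def Claim_equal_count_ops_mlp : Prop := ∀ (layers : Int) (hidden : Int), Dom_count_ops_mlp layers hidden → Spec_count_ops_mlp layers hidden (count_ops_mlp layers hidden)

-- ===== LEMMAS AND PROOFS =====

-- the loop state after n+1 iterations, in closed form
theorem count_ops_fold_range (h : Int) (n : Nat) :
    (List.range (n+1)).foldl
      (fun (st : Int × Int × Int) _ =>
        let out_dim := h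
        (st.1 + st.2.2 * out_dim, st.2.1 + st.2.2 * out_dim, out_dim))
      (0, 0, 1)
    = (h + (n : Int) * h * h, h + (n : Int) * h * h, h) := by
  induction n with
  | zero => simp
  | succ k ih =>
    rw [List.range_succ, List.foldl_append, ih]
    simp
    ring

-- ===== VERDICT (by name: the statement is the Claim_ definition above) =====
theorem count_ops_mlp_spec : Claim_equal_count_ops_mlp := by
  intro layers hidden _
  unfold Spec_count_ops_mlp count_ops_mlp count_ops_mlp_alt
  rw [PySem.List.pyRange_one]
  by_cases hle : layers ≤ 0
  · have h0 : layers.toNat = 0 := by omega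
    simp [h0, hle]
  · have h1 : 1 ≤ layers := by omega
    obtain ⟨k, hk⟩ : ∃ k : Nat, (layers - 0).toNat = k + 1 :=
      ⟨(layers - 0).toNat - 1, by omega⟩
    have hkc : (k : Int) = layers - 1 := by omega
    rw [hk]
    simp only [List.foldl_map] -- the mapped index is ignored by the body
    rw [count_ops_fold_range]
    simp [hle, hkc]
    ring
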